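-- pv_equiv track=rewrite | github.com/MohamedFathi2/OSSU---Journey | 01 - Introduction To CS course - MIT 6.0001/lecture12-ListComprehension-FunctionsAsObject-TestingAndDebugging/FingerExercise.py | count_sqrts
-- ===== SOURCE A (Python) =====
-- def count_sqrts(nums_list : list):
--     """
--     nums_list: a list
--     Assumes that nums_list only contains positive numbers and that there are no duplicates.
--     Returns how many elements in nums_list are exact squares of elements in the same list, including itself.
--     """
--     # Your code here
--     nums_list.sort()
--     count = 0
--     # using list comprehension:
--     '''
--     for curr in nums_list:
--         if [True for item in nums_list if curr**2 == item]:
--             count += 1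
--     return count
--     '''
--     # Simple Solution:
--     for item in nums_list:
--         if item**2 in nums_list:
--             count += 1
--     return count
-- ===== SOURCE B (Python) =====
-- def count_sqrts(nums_list: list):
--     """Merge-scan version: sort in place (same mutation as the original), build the
--     sorted list of squares, then count matches with a single two-pointer merge pass
--     instead of a per-element membership scan."""
--     nums_list.sort()
--     squares = sorted(x * x for x in nums_list)
--     count = 0
--     j = 0
--     n = len(nums_list)
--     for sq in squares:
--         while j < n and nums_list[j] < sq:
--             j += 1
--         if j < n and nums_list[j] == sq:
--             count += 1
--     return count
-- ===== Notes on version B (the rewrite author's own statement) =====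
-- stated objective: faster
-- what changed: Instead of testing 'item**2 in nums_list' for each element, B builds the sorted list of squares and counts the matches in one two-pointer merge pass over the two sorted sequences.
import Mathlib
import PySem

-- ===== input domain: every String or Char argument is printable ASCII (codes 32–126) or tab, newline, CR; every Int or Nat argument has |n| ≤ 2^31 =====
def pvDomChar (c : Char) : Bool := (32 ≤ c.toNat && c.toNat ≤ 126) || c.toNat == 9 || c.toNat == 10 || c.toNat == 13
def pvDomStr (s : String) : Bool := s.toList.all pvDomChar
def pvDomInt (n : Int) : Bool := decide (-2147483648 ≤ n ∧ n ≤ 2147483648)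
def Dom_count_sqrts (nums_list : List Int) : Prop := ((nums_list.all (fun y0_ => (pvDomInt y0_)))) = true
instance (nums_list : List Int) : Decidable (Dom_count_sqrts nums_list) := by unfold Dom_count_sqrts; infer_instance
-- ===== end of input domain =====

-- B sorts the squares once and counts matches in a single two-pointer merge pass over the two
-- sorted sequences (faster); both Pythons sort the argument in place — the equivalence here is
-- about the return value.

-- ===== PORT A =====
-- A: sort, then for each item test 'item**2 in nums_list' by list membership.
def count_sqrts (nums_list : List Int) : Int :=
  let s := PySem.List.sorted nums_list (fun x => x) false
  s.foldl (fun count item => if item * item ∈ s then count + 1 else count) 0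

-- ===== PORT B =====
-- B helper: the 'while j < n and nums_list[j] < sq: j += 1' loop.
def pvAdvance (s : List Int) (sq : Int) (j : Nat) : Nat :=
  if j < s.length ∧ s.getD j 0 < sq then pvAdvance s sq (j + 1) else j
termination_by s.length - j
decreasing_by omega

-- B: sort, build the sorted list of squares, then one merge pass with pointer j.
def count_sqrts_alt (nums_list : List Int) : Int :=
  let s := PySem.List.sorted nums_list (fun x => x) false
  let squares := PySem.List.sorted (s.map (fun x => x * x)) (fun x => x) false
  let r := squares.foldl (fun (st : Int × Nat) sq =>
      let j := pvAdvance s sq st.2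
      if j < s.length ∧ s.getD j 0 = sq then (st.1 + 1, j) else (st.1, j)) (0, 0)
  r.1

-- ===== PRECONDITION & SPEC =====
def Spec_count_sqrts (nums_list : List Int) (out : Int) : Prop := out = count_sqrts_alt nums_list
instance (nums_list : List Int) (out : Int) : Decidable (Spec_count_sqrts nums_list out) := by unfold Spec_count_sqrts; infer_instance

-- ===== CLAIM (what is proved, stated in full; the proofs are below) =====
def Claim_equal_count_sqrts : Prop := ∀ (nums_list : List Int), Dom_count_sqrts nums_list → Spec_count_sqrts nums_list (count_sqrts nums_list)

-- ===== LEMMAS AND PROOFS =====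

-- The while-loop only moves j forward, skips exactly the entries < sq, and stops at an entry ≥ sq (or the end).
theorem pvAdvance_spec (s : List Int) (sq : Int) (j : Nat) :
    j ≤ pvAdvance s sq j ∧
    (∀ k, j ≤ k → k < pvAdvance s sq j → s.getD k 0 < sq) ∧
    (pvAdvance s sq j < s.length → ¬ s.getD (pvAdvance s sq j) 0 < sq) := by
  induction j using pvAdvance.induct (s := s) (sq := sq) with
  | case1 j h ih =>
    rw [pvAdvance, if_pos h]
    refine ⟨by omega, ?_, ih.2.2⟩
    intro k hk1 hk2
    rcases Nat.eq_or_lt_of_le hk1 with h' | h'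
    · exact h' ▸ h.2
    · exact ih.2.1 k h' hk2
  | case2 j h =>
    rw [pvAdvance, if_neg h]
    exact ⟨le_rfl, fun k hk1 hk2 => absurd hk1 (by omega), fun h1 h2 => h ⟨h1, h2⟩⟩

-- On a (≤)-sorted list, a stop position below which everything is < sq hits sq exactly when sq ∈ s.
theorem hit_iff_mem (s : List Int) (hs : s.Pairwise (· ≤ ·)) (sq : Int) (i : Nat)
    (hlt : ∀ k < i, s.getD k 0 < sq) (hstop : i < s.length → ¬ s.getD i 0 < sq) :
    (i < s.length ∧ s.getD i 0 = sq) ↔ sq ∈ s := by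
  constructor
  · rintro ⟨h1, h2⟩
    rw [List.getD_eq_getElem s 0 h1] at h2
    exact h2 ▸ List.getElem_mem h1
  · intro hmem
    obtain ⟨p, hp, hpv⟩ := List.mem_iff_getElem.mp hmem
    have hip : i ≤ p := by
      by_contra h
      have := hlt p (by omega)
      rw [List.getD_eq_getElem s 0 hp] at this
      omega
    have h1 : i < s.length := lt_of_le_of_lt hip hp
    refine ⟨h1, ?_⟩
    rw [List.getD_eq_getElem s 0 h1]
    have hge : ¬ s[i] < sq := by
      have := hstop h1
      rwa [List.getD_eq_getElem s 0 h1] at this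
    have hmono : s[i] ≤ s[p] := by
      rcases lt_or_eq_of_le hip with h | h
      · exact List.pairwise_iff_getElem.mp hs i p h1 hp h
      · simp [h]
    omega

-- A's counting fold is the filter length (over the squares of the items).
theorem foldl_count_filter (s : List Int) (l : List Int) (c : Int) :
    l.foldl (fun count item => if item * item ∈ s then count + 1 else count) c
      = c + ((l.map (fun x => x * x)).filter (fun sq => decide (sq ∈ s))).length := by
  induction l generalizing c with
  | nil => simp
  | cons x t ih =>
    simp only [List.foldl_cons, List.map_cons, List.filter_cons]
    by_cases h : x * x ∈ s
    · simp [h, ih, List.length_cons]; ring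
    · simp [h, ih]

-- B's merge pass counts the filter length, given that j has skipped only entries below every pending square.
theorem foldB (s : List Int) (hs : s.Pairwise (· ≤ ·)) (sqs : List Int)
    (hp : sqs.Pairwise (· ≤ ·)) (c : Int) (j : Nat)
    (H : ∀ sq ∈ sqs, ∀ k < j, s.getD k 0 < sq) :
    (sqs.foldl (fun (st : Int × Nat) sq =>
        let i := pvAdvance s sq st.2
        if i < s.length ∧ s.getD i 0 = sq then (st.1 + 1, i) else (st.1, i)) (c, j)).1
      = c + (sqs.filter (fun sq => decide (sq ∈ s))).length := by
  induction sqs generalizing c j with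
  | nil => simp
  | cons sq rest ih =>
    obtain ⟨hhead, hrest⟩ := List.pairwise_cons.mp hp
    obtain ⟨hji, hmid, hstop⟩ := pvAdvance_spec s sq j
    set i := pvAdvance s sq j with hi
    have hlt : ∀ k < i, s.getD k 0 < sq := by
      intro k hk
      by_cases hkj : k < j
      · exact H sq (List.mem_cons_self) k hkj
      · exact hmid k (by omega) hk
    have hmem := hit_iff_mem s hs sq i hlt hstop
    have Hrest : ∀ sq' ∈ rest, ∀ k < i, s.getD k 0 < sq' := by
      intro sq' hsq' k hk
      exact lt_of_lt_of_le (hlt k hk) (hhead sq' hsq')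
    simp only [List.foldl_cons]
    rw [← hi]
    by_cases h : i < s.length ∧ s.getD i 0 = sq
    · have hin : sq ∈ s := hmem.mp h
      rw [if_pos h, ih hrest (c + 1) i Hrest, List.filter_cons_of_pos (by simpa using hin)]
      simp [List.length_cons]; ring
    · have hout : sq ∉ s := fun hm => h (hmem.mpr hm)
      rw [if_neg h, ih hrest c i Hrest, List.filter_cons_of_neg (by simpa using hout)]

-- ===== VERDICT (by name: the statement is the Claim_ definition above) =====
theorem count_sqrts_spec : Claim_equal_count_sqrts := by
  intro nums_list _
  unfold Spec_count_sqrts count_sqrts count_sqrts_alt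
  set s := PySem.List.sorted nums_list (fun x => x) false with hsdef
  have hs : s.Pairwise (· ≤ ·) := PySem.List.sorted_pairwise nums_list (fun x => x)
  set squares := PySem.List.sorted (s.map (fun x => x * x)) (fun x => x) false with hsq
  have hsp : squares.Pairwise (· ≤ ·) := PySem.List.sorted_pairwise _ (fun x => x)
  have hperm : squares.Perm (s.map (fun x => x * x)) := PySem.List.sorted_perm _ _ _
  rw [foldl_count_filter s s 0,
      foldB s hs squares hsp 0 0 (fun sq _ k hk => absurd hk (Nat.not_lt_zero k))]
  have := (hperm.filter (fun sq => decide (sq ∈ s))).length_eq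
  omega
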